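-- pv_equiv track=rewrite | github.com/DOI-USGS/gems-tools-pro | Scripts/GeMS_TopologyCheck.py | youngestMapUnit
-- ===== SOURCE A (Python) =====
-- def youngestMapUnit(mapUnits, hKeyDict):
--     # arcpy.AddMessage(f'mapUnits = {mapUnits}')
--     # arcpy.AddMessage(hKeyDict)
--     # returns youngest map unit in list mapUnits
--     ymu = mapUnits[0]
--     for mu in mapUnits[1:]:
--         # in Python 2.7 None is returned if the dictionary key is not found and 'None < str', evaluates to True.
--         # Python 3 is not so forgiving, this produces a TypeError
--         # but the code below reproduces the Python 2.7 behavior by returning "" if the dictionary key is not found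
--         # Because '' and None can be be keys in hKeyDict, mu_hkey = hKeyDict.get(mu, "") was not working, returning None.
--         if hKeyDict[ymu] is None:
--             ymu_hkey = ""
--         else:
--             ymu_hkey = hKeyDict[ymu]
--
--         if hKeyDict[mu] is None:
--             mu_hkey = ""
--         else:
--             mu_hkey = hKeyDict[mu]
--
--         if mu_hkey < ymu_hkey:
--             ymu = mu
--     return ymu
-- ===== SOURCE B (Python) =====
-- def youngestMapUnit(mapUnits, hKeyDict):
--     # staged passes: materialize the effective hKeys, then look up the first minimum
--     keys = ["" if hKeyDict[mu] is None else hKeyDict[mu] for mu in mapUnits]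
--     return mapUnits[keys.index(min(keys))]
-- ===== Notes on version B (the rewrite author's own statement) =====
-- stated objective: simpler
-- what changed: Replaces the explicit min-tracking loop with staged passes: build the list of effective hKeys (None mapped to ''), take min() of that list and return the map unit at its first index, which matches A's keep-earliest strict-< behaviour.
-- outside the precondition, e.g. on youngestMapUnit(['X'], {}): A returns 'X', B raises KeyError
import Mathlib
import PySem

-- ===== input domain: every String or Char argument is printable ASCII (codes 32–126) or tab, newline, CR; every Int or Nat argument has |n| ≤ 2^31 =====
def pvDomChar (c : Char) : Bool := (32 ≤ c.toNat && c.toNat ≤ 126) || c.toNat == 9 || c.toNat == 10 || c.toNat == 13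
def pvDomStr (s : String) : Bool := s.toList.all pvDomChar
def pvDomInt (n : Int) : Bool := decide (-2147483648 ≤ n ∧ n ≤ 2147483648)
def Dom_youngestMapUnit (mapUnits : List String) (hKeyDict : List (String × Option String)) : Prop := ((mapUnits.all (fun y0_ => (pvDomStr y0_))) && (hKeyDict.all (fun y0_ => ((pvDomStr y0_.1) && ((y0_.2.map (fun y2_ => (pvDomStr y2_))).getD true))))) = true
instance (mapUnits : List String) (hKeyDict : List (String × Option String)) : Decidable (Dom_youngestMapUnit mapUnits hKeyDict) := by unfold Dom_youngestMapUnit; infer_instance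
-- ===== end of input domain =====

-- B replaces A's explicit min-tracking loop by staged passes: list of effective keys, min(), index(), lookup (simpler, same result).


-- ===== PORT A =====
-- hKeyDict[mu], then the two None-to-"" branches; the 'none' (KeyError) case is excluded by Pre_
def pvHKeyA (hKeyDict : List (String × Option String)) (mu : String) : String :=
  match (PySem.Dict.mk hKeyDict).get? mu with
  | some (some s) => s
  | _ => ""

def youngestMapUnit (mapUnits : List String) (hKeyDict : List (String × Option String)) : String :=
  match mapUnits with
  | [] => ""  -- mapUnits[0] raises IndexError in Python; excluded by Pre_
  | ymu0 :: rest =>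
    rest.foldl (fun ymu mu =>
      let ymu_hkey := pvHKeyA hKeyDict ymu
      let mu_hkey := pvHKeyA hKeyDict mu
      if mu_hkey < ymu_hkey then mu else ymu) ymu0

-- ===== PORT B =====
-- the list-comprehension entry: '' if hKeyDict[mu] is None else hKeyDict[mu]; the KeyError case is excluded by Pre_
def pvKeyB (hKeyDict : List (String × Option String)) (mu : String) : String :=
  match (PySem.Dict.mk hKeyDict).get? mu with
  | some (some s) => s
  | _ => ""

def youngestMapUnit_alt (mapUnits : List String) (hKeyDict : List (String × Option String)) : String :=
  let keys := mapUnits.map (pvKeyB hKeyDict)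
  match PySem.List.min? keys (fun y => y) with
  | none => ""  -- min([]) raises ValueError in Python; excluded by Pre_
  | some m =>
    match PySem.List.index? keys m with
    | none => ""  -- keys.index would raise ValueError; unreachable since m ∈ keys
    | some i =>
      match PySem.List.pyGet? mapUnits (i : Int) with
      | some s => s
      | none => ""  -- unreachable: i < keys.length = mapUnits.length

-- ===== PRECONDITION & SPEC =====
-- Pre_ excludes inputs where Python raises: empty mapUnits (IndexError/ValueError) and map units missing
-- from hKeyDict (KeyError in B always, and in A whenever mapUnits has ≥ 2 elements; A's returning the
-- singleton without validating its key is accidental, and B's natural key pass raises there).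
def Pre_youngestMapUnit (mapUnits : List String) (hKeyDict : List (String × Option String)) : Prop :=
  mapUnits ≠ [] ∧ ∀ mu ∈ mapUnits, (hKeyDict.map Prod.fst).contains mu = true
instance (mapUnits : List String) (hKeyDict : List (String × Option String)) : Decidable (Pre_youngestMapUnit mapUnits hKeyDict) := by unfold Pre_youngestMapUnit; infer_instance

def pvWitness_youngestMapUnit : List String × (List (String × Option String)) :=
  (["Qal", "Tg", "Qal"], [("Qal", some "1"), ("Tg", none)])

def Spec_youngestMapUnit (mapUnits : List String) (hKeyDict : List (String × Option String)) (out : String) : Prop := out = youngestMapUnit_alt mapUnits hKeyDict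
instance (mapUnits : List String) (hKeyDict : List (String × Option String)) (out : String) : Decidable (Spec_youngestMapUnit mapUnits hKeyDict out) := by unfold Spec_youngestMapUnit; infer_instance

-- ===== CLAIM (what is proved, stated in full; the proofs are below) =====
def Claim_equal_youngestMapUnit : Prop := ∀ (mapUnits : List String) (hKeyDict : List (String × Option String)), Dom_youngestMapUnit mapUnits hKeyDict → Pre_youngestMapUnit mapUnits hKeyDict → Spec_youngestMapUnit mapUnits hKeyDict (youngestMapUnit mapUnits hKeyDict)

-- ===== LEMMAS AND PROOFS =====

-- A's min-tracking loop, as a standalone fold (proof helper)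
def pvSel (k : String → String) (a : String) (t : List String) : String :=
  t.foldl (fun y z => if k z < k y then z else y) a

theorem pvSel_cons (k : String → String) (a x : String) (t : List String) :
    pvSel k a (x :: t) = pvSel k (if k x < k a then x else a) t := by
  simp only [pvSel, List.foldl_cons]

-- the loop result's key never exceeds the start's key
theorem pvSel_key_le (k : String → String) :
    ∀ (t : List String) (a : String), k (pvSel k a t) ≤ k a := by
  intro t
  induction t with
  | nil => intro a; exact le_refl _
  | cons x t ih =>
    intro a
    rw [pvSel_cons]
    by_cases hx : k x < k a
    · simp only [hx, if_true]; exact le_of_lt (lt_of_le_of_lt (ih x) hx)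
    · simp only [hx, if_false]; exact ih a

-- the loop computes the running minimum of the keys
theorem pvSel_min (k : String → String) :
    ∀ (t : List String) (a : String), (t.map k).foldl min (k a) = k (pvSel k a t) := by
  intro t
  induction t with
  | nil => intro a; rfl
  | cons x t ih =>
    intro a
    rw [pvSel_cons]
    simp only [List.map_cons, List.foldl_cons]
    by_cases hx : k x < k a
    · simp only [hx, if_true, min_eq_right (le_of_lt hx)]; exact ih x
    · simp only [hx, if_false, min_eq_left (le_of_not_gt hx)]; exact ih a

-- the loop result sits at the first index of its key in the key list
theorem pvSel_index (k : String → String) :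
    ∀ (t : List String) (a : String), ∃ i : Nat,
      PySem.List.index? ((a :: t).map k) (k (pvSel k a t)) = some i ∧
      (a :: t)[i]? = some (pvSel k a t) := by
  intro t
  induction t with
  | nil =>
    intro a
    exact ⟨0, by simp [pvSel], rfl⟩
  | cons x t ih =>
    intro a
    rw [pvSel_cons]
    by_cases hx : k x < k a
    · simp only [hx, if_true]
      obtain ⟨i, hidx, hget⟩ := ih x
      have hne : k a ≠ k (pvSel k x t) :=
        ne_of_gt (lt_of_le_of_lt (pvSel_key_le k t x) hx)
      refine ⟨i + 1, ?_, ?_⟩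
      · rw [List.map_cons, PySem.List.index?_cons_of_ne _ hne, hidx]; rfl
      · simpa using hget
    · simp only [hx, if_false]
      obtain ⟨i, hidx, hget⟩ := ih a
      cases i with
      | zero =>
        have ha : a = pvSel k a t := by simpa using hget
        refine ⟨0, ?_, by simp [← ha]⟩
        rw [List.map_cons, ← ha, PySem.List.index?_cons_self]
      | succ j =>
        -- k a occurs strictly before index j+1, so k a ≠ the minimum key
        have hne_a : k a ≠ k (pvSel k a t) := by
          intro h
          rw [List.map_cons, ← h, PySem.List.index?_cons_self] at hidx
          simp at hidx
        have hlt : k (pvSel k a t) < k a :=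
          lt_of_le_of_ne (pvSel_key_le k t a) (fun h => hne_a h.symm)
        have hne_x : k x ≠ k (pvSel k a t) :=
          ne_of_gt (lt_of_lt_of_le hlt (le_of_not_gt hx))
        rw [List.map_cons, PySem.List.index?_cons_of_ne _ hne_a] at hidx
        refine ⟨j + 2, ?_, ?_⟩
        · rw [List.map_cons, PySem.List.index?_cons_of_ne _ hne_a,
              List.map_cons, PySem.List.index?_cons_of_ne _ hne_x]
          rcases Option.map_eq_some_iff.mp hidx with ⟨j', hj', hj'eq⟩
          rw [hj']
          simp only [Option.map_some, Option.some.injEq]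
          omega
        · have : (a :: t)[j + 1]? = t[j]? := rfl
          rw [this] at hget
          simpa using hget

theorem youngestMapUnit_spec : Claim_equal_youngestMapUnit := by
  intro mapUnits hKeyDict _ hpre
  unfold Spec_youngestMapUnit
  obtain ⟨hne, -⟩ := hpre
  cases mapUnits with
  | nil => exact absurd rfl hne
  | cons a t =>
    have hkeq : pvKeyB hKeyDict = pvHKeyA hKeyDict := rfl
    set k := pvHKeyA hKeyDict with hk
    have hA : youngestMapUnit (a :: t) hKeyDict = pvSel k a t := rfl
    obtain ⟨i, hidx, hget⟩ := pvSel_index k t a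
    rw [List.map_cons] at hidx
    rw [hA]
    simp only [youngestMapUnit_alt, hkeq, List.map_cons, PySem.List.min?_id_cons,
      pvSel_min k t a, hidx, PySem.List.pyGet?_natCast, hget]
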